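-- pv_equiv track=rewrite | github.com/themangokid/gen_dev_slides | slides_1_6.py | create_lists
-- ===== SOURCE A (Python) =====
-- def create_lists(sentences):
--     lists = []
--     list_items = []
--     count = 0
--     for sentence in sentences:
--         list_items.append("- " + sentence)
--         count += 1
--         if count % 5 == 0 or count == len(sentences):
--             lists.append("\n".join(list_items))
--             list_items = []
--     return lists
-- ===== SOURCE B (Python) =====
-- def create_lists(sentences):
--     return ["\n".join("- " + s for s in sentences[i:i + 5])
--             for i in range(0, len(sentences), 5)]
-- ===== Notes on version B (the rewrite author's own statement) =====
-- stated objective: simpler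
-- what changed: Replaced the counter/accumulator/flush loop with index striding: slice sentences[i:i+5] for i in range(0, len, 5) and join each slice, eliminating the count variable, the running list_items accumulator and the modulo/length flush condition.
import Mathlib
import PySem

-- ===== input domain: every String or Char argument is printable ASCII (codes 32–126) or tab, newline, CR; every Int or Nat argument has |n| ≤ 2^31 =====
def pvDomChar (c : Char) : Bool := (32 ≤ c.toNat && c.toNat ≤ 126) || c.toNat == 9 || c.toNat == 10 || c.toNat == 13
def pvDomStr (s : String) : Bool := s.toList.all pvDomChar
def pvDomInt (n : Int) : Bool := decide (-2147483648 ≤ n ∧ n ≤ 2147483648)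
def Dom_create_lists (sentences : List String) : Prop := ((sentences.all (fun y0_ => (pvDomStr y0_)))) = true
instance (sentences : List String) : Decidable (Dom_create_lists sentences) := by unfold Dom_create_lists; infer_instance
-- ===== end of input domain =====

-- B replaces A's counter-and-flush accumulator loop by striding slices (range(0, len, 5)); same values, simpler.

-- ===== PORT A =====
-- body of A's for-loop, on state (lists, list_items, count); n = len(sentences)
def pyStepA (n : Int) (st : List String × List String × Int) (sentence : String) :
    List String × List String × Int :=
  let list_items := st.2.1 ++ ["- " ++ sentence]
  let count := st.2.2 + 1
  if count % 5 == 0 || count == n then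
    (st.1 ++ [PySem.Str.join "\n" list_items], [], count)
  else
    (st.1, list_items, count)

def create_lists (sentences : List String) : List String :=
  (sentences.foldl (pyStepA (sentences.length : Int)) ([], [], 0)).1

-- ===== PORT B =====
def create_lists_alt (sentences : List String) : List String :=
  (PySem.List.pyRange 0 (sentences.length : Int) 5).map (fun i =>
    PySem.Str.join "\n"
      ((PySem.List.slice sentences (some i) (some (i + 5))).map (fun s => "- " ++ s)))

-- ===== PRECONDITION & SPEC =====
def Spec_create_lists (sentences : List String) (out : List String) : Prop := out = create_lists_alt sentences
instance (sentences : List String) (out : List String) : Decidable (Spec_create_lists sentences out) := by unfold Spec_create_lists; infer_instance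

-- ===== CLAIM (what is proved, stated in full; the proofs are below) =====
def Claim_equal_create_lists : Prop := ∀ (sentences : List String), Dom_create_lists sentences → Spec_create_lists sentences (create_lists sentences)

-- ===== LEMMAS AND PROOFS =====

-- reference chunking: join each successive block of five
def chunkJoin : List String → List String
  | [] => []
  | s :: rest =>
      PySem.Str.join "\n" (((s :: rest).take 5).map (fun x => "- " ++ x)) ::
        chunkJoin (rest.drop 4)
  termination_by l => l.length
  decreasing_by simp

lemma chunkJoin_nil : chunkJoin [] = [] := by rw [chunkJoin.eq_def]

lemma chunkJoin_cons (s : String) (rest : List String) :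
    chunkJoin (s :: rest)
      = PySem.Str.join "\n" (((s :: rest).take 5).map (fun x => "- " ++ x)) ::
          chunkJoin ((s :: rest).drop 5) := by
  rw [List.drop_succ_cons, chunkJoin.eq_def]

lemma pyRange5_nil (a b : Int) (h : b ≤ a) : PySem.List.pyRange a b 5 = [] := by
  rw [PySem.List.pyRange_of_pos a b (by norm_num), if_neg (by omega)]
  rfl

lemma pyRange5_cons (a b : Int) (h : a < b) :
    PySem.List.pyRange a b 5 = a :: PySem.List.pyRange (a + 5) b 5 := by
  rw [PySem.List.pyRange_of_pos a b (by norm_num),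
      PySem.List.pyRange_of_pos (a + 5) b (by norm_num), if_pos h]
  have hc : ((b - a + 5 - 1) / 5).toNat
      = (if a + 5 < b then ((b - (a + 5) + 5 - 1) / 5).toNat else 0) + 1 := by
    split_ifs <;> omega
  rw [hc, List.range_succ_eq_map, List.map_cons, List.map_map]
  congr 1
  · simp
  · exact List.map_congr_left (fun k _ => by simp [Function.comp]; ring)

-- B equals the reference chunking
lemma alt_aux (l : List String) :
    ∀ (fuel j : Nat), l.length ≤ j + fuel →
      (PySem.List.pyRange (j : Int) (l.length : Int) 5).map (fun i =>
        PySem.Str.join "\n"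
          ((PySem.List.slice l (some i) (some (i + 5))).map (fun s => "- " ++ s)))
        = chunkJoin (l.drop j) := by
  intro fuel
  induction fuel with
  | zero =>
      intro j hj
      rw [pyRange5_nil _ _ (by exact_mod_cast by omega), List.map_nil,
          List.drop_eq_nil_of_le (by omega), chunkJoin_nil]
  | succ fuel ih =>
      intro j hj
      by_cases hlt : j < l.length
      · rw [pyRange5_cons _ _ (by exact_mod_cast hlt), List.map_cons]
        have hslice : PySem.List.slice l (some (j : Int)) (some ((j : Int) + 5))
            = (l.drop j).take 5 := by
          have := PySem.List.slice_natCast_add l j 5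
          push_cast at this
          exact this
        rw [hslice]
        have htail : ((j : Int) + 5) = ((j + 5 : Nat) : Int) := by push_cast; ring
        rw [htail, ih (j + 5) (by omega)]
        obtain ⟨x, xs, hx⟩ : ∃ x xs, l.drop j = x :: xs := by
          cases h' : l.drop j with
          | nil => exact absurd (congrArg List.length h') (by simp; omega)
          | cons x xs => exact ⟨x, xs, rfl⟩
        rw [hx, chunkJoin_cons, ← hx, List.drop_drop]
      · rw [pyRange5_nil _ _ (by exact_mod_cast by omega), List.map_nil,
            List.drop_eq_nil_of_le (by omega), chunkJoin_nil]

lemma alt_eq_chunkJoin (l : List String) : create_lists_alt l = chunkJoin l := by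
  have := alt_aux l l.length 0 (by omega)
  simpa [create_lists_alt] using this

-- one loop step of A, not flushing / flushing
lemma stepA_no (n : Int) (ls items : List String) (c : Int) (s : String)
    (h1 : (c + 1) % 5 ≠ 0) (h2 : c + 1 ≠ n) :
    pyStepA n (ls, items, c) s = (ls, items ++ ["- " ++ s], c + 1) := by
  simp only [pyStepA]
  rw [if_neg (by simp [h1, h2])]

lemma stepA_yes (n : Int) (ls items : List String) (c : Int) (s : String)
    (h : (c + 1) % 5 = 0 ∨ c + 1 = n) :
    pyStepA n (ls, items, c) s
      = (ls ++ [PySem.Str.join "\n" (items ++ ["- " ++ s])], [], c + 1) := by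
  simp only [pyStepA]
  rw [if_pos (by rcases h with h | h <;> simp [h])]

-- A's fold equals the reference chunking: invariant n = count + |rest|, count ≡ 0 (mod 5)
lemma foldA (n : Int) :
    ∀ (fuel : Nat) (rest lists : List String) (count : Int),
      rest.length ≤ fuel →
      n = count + rest.length → count % 5 = 0 →
      (List.foldl (pyStepA n) (lists, [], count) rest).1 = lists ++ chunkJoin rest := by
  intro fuel
  induction fuel with
  | zero =>
      intro rest lists count hf hn hc
      have : rest = [] := List.eq_nil_of_length_eq_zero (by omega)
      subst this
      simp [chunkJoin_nil]
  | succ fuel ih =>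
      intro rest lists count hf hn hc
      match rest with
      | [] => simp [chunkJoin_nil]
      | [a] =>
          simp only [List.length_cons, List.length_nil] at hn; push_cast at hn
          rw [List.foldl_cons, stepA_yes _ _ _ _ _ (Or.inr (by omega)), List.foldl_nil]
          rw [chunkJoin_cons]
          simp [chunkJoin_nil]
      | [a, b] =>
          simp only [List.length_cons, List.length_nil] at hn; push_cast at hn
          rw [List.foldl_cons, stepA_no _ _ _ _ _ (by omega) (by omega),
              List.foldl_cons, stepA_yes _ _ _ _ _ (Or.inr (by omega)), List.foldl_nil]
          rw [chunkJoin_cons]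
          simp [chunkJoin_nil]
      | [a, b, c] =>
          simp only [List.length_cons, List.length_nil] at hn; push_cast at hn
          rw [List.foldl_cons, stepA_no _ _ _ _ _ (by omega) (by omega),
              List.foldl_cons, stepA_no _ _ _ _ _ (by omega) (by omega),
              List.foldl_cons, stepA_yes _ _ _ _ _ (Or.inr (by omega)), List.foldl_nil]
          rw [chunkJoin_cons]
          simp [chunkJoin_nil]
      | [a, b, c, d] =>
          simp only [List.length_cons, List.length_nil] at hn; push_cast at hn
          rw [List.foldl_cons, stepA_no _ _ _ _ _ (by omega) (by omega),
              List.foldl_cons, stepA_no _ _ _ _ _ (by omega) (by omega),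
              List.foldl_cons, stepA_no _ _ _ _ _ (by omega) (by omega),
              List.foldl_cons, stepA_yes _ _ _ _ _ (Or.inr (by omega)), List.foldl_nil]
          rw [chunkJoin_cons]
          simp [chunkJoin_nil]
      | a :: b :: c :: d :: e :: rest' =>
          simp only [List.length_cons] at hn hf
          push_cast at hn
          rw [List.foldl_cons, stepA_no _ _ _ _ _ (by omega) (by omega),
              List.foldl_cons, stepA_no _ _ _ _ _ (by omega) (by omega),
              List.foldl_cons, stepA_no _ _ _ _ _ (by omega) (by omega),
              List.foldl_cons, stepA_no _ _ _ _ _ (by omega) (by omega),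
              List.foldl_cons, stepA_yes _ _ _ _ _ (Or.inl (by omega))]
          rw [ih rest' _ (count + 1 + 1 + 1 + 1 + 1) (by omega) (by omega)
              (by omega)]
          rw [chunkJoin_cons]
          simp

-- ===== VERDICT (by name: the statement is the Claim_ definition above) =====
theorem create_lists_spec : Claim_equal_create_lists := by
  intro sentences _
  show create_lists sentences = create_lists_alt sentences
  rw [alt_eq_chunkJoin]
  exact foldA (sentences.length : Int) sentences.length sentences [] 0
    (le_refl _) (by ring) (by norm_num)
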